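-- pv_equiv track=rewrite | github.com/Ricky-Hu5918/Python-Lab | 520_Detect_Capital.py | detectCapitalUse2
-- ===== SOURCE A (Python) =====
-- def detectCapitalUse2(word: str) -> bool:
--     if len(word) == 1: return True
--     flag = set()
--
--     for i in range(len(word)):
--         if word[i].isupper():
--             if i!= 0: flag.add(1)
--         else:
--             flag.add(0)
--
--     return len(flag) == 1
-- ===== SOURCE B (Python) =====
-- def detectCapitalUse2(word: str) -> bool:
--     if len(word) == 1:
--         return True
--     if not word:
--         return False
--     up = sum(c.isupper() for c in word)
--     return up == 0 or up == len(word) or (up == 1 and word[0].isupper())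
-- ===== Notes on version B (the rewrite author's own statement) =====
-- stated objective: simpler
-- what changed: Replaces the set-of-0/1-flags accumulated by an in-loop position branch with a single uppercase count (one C-level sum) and one final three-way condition, plus an explicit empty-string guard.
import Mathlib
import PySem

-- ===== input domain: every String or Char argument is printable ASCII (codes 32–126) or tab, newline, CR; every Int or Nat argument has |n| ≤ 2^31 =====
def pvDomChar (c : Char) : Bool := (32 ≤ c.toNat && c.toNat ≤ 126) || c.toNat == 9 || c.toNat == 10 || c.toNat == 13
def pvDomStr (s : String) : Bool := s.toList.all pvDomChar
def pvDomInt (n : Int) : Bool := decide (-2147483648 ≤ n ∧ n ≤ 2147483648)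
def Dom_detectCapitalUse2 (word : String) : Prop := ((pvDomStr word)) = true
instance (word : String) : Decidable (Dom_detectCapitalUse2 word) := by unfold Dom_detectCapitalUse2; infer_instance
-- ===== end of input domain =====

-- B replaces A's set-of-0/1-flags with a single uppercase count and a final three-way condition (simpler; same exact behaviour).


-- ===== PORT A =====
-- the loop body of A: for (i, ch) with i the 0-based index
def pvStepA (flag : PySem.Set Int) (p : Int × Char) : PySem.Set Int :=
  if PySem.Chars.isupper p.2 then
    (if p.1 != 0 then PySem.Set.add flag 1 else flag)
  else PySem.Set.add flag 0

def detectCapitalUse2 (word : String) : Bool :=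
  if PySem.Str.len word == 1 then true
  else
    let flag := (PySem.List.enumerate word.toList 0).foldl pvStepA PySem.Set.empty
    PySem.Set.len flag == 1

-- ===== PORT B =====
def detectCapitalUse2_alt (word : String) : Bool :=
  if PySem.Str.len word == 1 then true
  else if word.toList.isEmpty then false
  else
    let up : Int := (word.toList.map (fun c => if PySem.Chars.isupper c then (1 : Int) else 0)).sum
    up == 0 || up == PySem.Str.len word || (up == 1 && PySem.Chars.isupper (word.toList.headD ' '))

-- ===== PRECONDITION & SPEC =====
def Spec_detectCapitalUse2 (word : String) (out : Bool) : Prop := out = detectCapitalUse2_alt word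
instance (word : String) (out : Bool) : Decidable (Spec_detectCapitalUse2 word out) := by unfold Spec_detectCapitalUse2; infer_instance

-- ===== CLAIM (what is proved, stated in full; the proofs are below) =====
def Claim_equal_detectCapitalUse2 : Prop := ∀ (word : String), Dom_detectCapitalUse2 word → Spec_detectCapitalUse2 word (detectCapitalUse2 word)

-- ===== LEMMAS AND PROOFS =====

-- the step A's loop performs at every index i ≠ 0
def pvStepTail (flag : PySem.Set Int) (c : Char) : PySem.Set Int :=
  if PySem.Chars.isupper c then PySem.Set.add flag 1 else PySem.Set.add flag 0

-- reachable flag states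
def pvGood (s : PySem.Set Int) : Prop := s = [] ∨ s = [0] ∨ s = [1] ∨ s = [0, 1] ∨ s = [1, 0]

lemma pv_enum_fold (cs : List Char) (start : Int) (h : 0 < start) (s : PySem.Set Int) :
    (PySem.List.enumerate cs start).foldl pvStepA s = cs.foldl pvStepTail s := by
  induction cs generalizing start s with
  | nil => rfl
  | cons c cs ih =>
      rw [PySem.List.enumerate_cons]
      simp only [List.foldl_cons]
      rw [ih (start + 1) (by omega)]
      congr 1
      simp [pvStepA, pvStepTail, show start ≠ 0 by omega]

lemma pv_tail_fold (cs : List Char) (s : PySem.Set Int) (hs : pvGood s) :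
    pvGood (cs.foldl pvStepTail s) ∧
    ((0 : Int) ∈ cs.foldl pvStepTail s ↔ (0 : Int) ∈ s ∨ ∃ c ∈ cs, PySem.Chars.isupper c = false) ∧
    ((1 : Int) ∈ cs.foldl pvStepTail s ↔ (1 : Int) ∈ s ∨ ∃ c ∈ cs, PySem.Chars.isupper c = true) := by
  induction cs generalizing s with
  | nil => simpa using hs
  | cons c cs ih =>
      simp only [List.foldl_cons]
      have step : pvGood (pvStepTail s c) ∧
          ((0 : Int) ∈ pvStepTail s c ↔ (0 : Int) ∈ s ∨ PySem.Chars.isupper c = false) ∧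
          ((1 : Int) ∈ pvStepTail s c ↔ (1 : Int) ∈ s ∨ PySem.Chars.isupper c = true) := by
        rcases hs with h | h | h | h | h <;> subst h <;>
          cases hup : PySem.Chars.isupper c <;>
          simp [pvStepTail, pvGood, PySem.Set.add, PySem.Set.contains, hup]
      obtain ⟨hg, h0, h1⟩ := step
      obtain ⟨hg', h0', h1'⟩ := ih _ hg
      refine ⟨hg', ?_, ?_⟩
      · rw [h0', h0]; constructor
        · rintro ((h | h) | ⟨d, hd, hdu⟩)
          · exact Or.inl h
          · exact Or.inr ⟨c, by simp, h⟩
          · exact Or.inr ⟨d, by simp [hd], hdu⟩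
        · rintro (h | ⟨d, hd, hdu⟩)
          · exact Or.inl (Or.inl h)
          · rcases List.mem_cons.mp hd with h | h
            · exact Or.inl (Or.inr (h ▸ hdu))
            · exact Or.inr ⟨d, h, hdu⟩
      · rw [h1', h1]; constructor
        · rintro ((h | h) | ⟨d, hd, hdu⟩)
          · exact Or.inl h
          · exact Or.inr ⟨c, by simp, h⟩
          · exact Or.inr ⟨d, by simp [hd], hdu⟩
        · rintro (h | ⟨d, hd, hdu⟩)
          · exact Or.inl (Or.inl h)
          · rcases List.mem_cons.mp hd with h | h
            · exact Or.inl (Or.inr (h ▸ hdu))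
            · exact Or.inr ⟨d, h, hdu⟩

lemma pv_main (word : String) : detectCapitalUse2 word = detectCapitalUse2_alt word := by
  unfold detectCapitalUse2 detectCapitalUse2_alt
  rcases h : word.toList with _ | ⟨c, cs'⟩
  · simp [PySem.Str.len, h, PySem.List.enumerate, PySem.Set.len, PySem.Set.empty]
  · rcases cs' with _ | ⟨d, rest⟩
    · simp [PySem.Str.len, h]
    · have hne : (PySem.Str.len word == 1) = false := by
        simp [PySem.Str.len, h]; omega
      rw [hne]
      simp only [Bool.false_eq_true, if_false, List.isEmpty_cons, List.headD_cons,
        PySem.List.sum_map_ite_one_zero]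
      rw [PySem.List.enumerate_cons, List.foldl_cons, pv_enum_fold (d :: rest) (0 + 1) (by omega)]
      have hcount : List.countP PySem.Chars.isupper (c :: d :: rest)
          = (if PySem.Chars.isupper c then 1 else 0) + List.countP PySem.Chars.isupper (d :: rest) := by
        rw [List.countP_cons]; split_ifs <;> omega
      have hlen : PySem.Str.len word = ((rest.length + 2 : Nat) : Int) := by
        simp [PySem.Str.len, h]; omega
      have hle : List.countP PySem.Chars.isupper (d :: rest) ≤ rest.length + 1 := by
        simpa using List.countP_le_length (p := PySem.Chars.isupper) (l := d :: rest)
      have hler : List.countP PySem.Chars.isupper rest ≤ rest.length :=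
        List.countP_le_length (p := PySem.Chars.isupper) (l := rest)
      by_cases hU : ∃ e ∈ d :: rest, PySem.Chars.isupper e = true
      case pos =>
        have hU' : List.countP PySem.Chars.isupper (d :: rest) ≠ 0 := by
          simp only [ne_eq, List.countP_eq_zero]
          push Not
          obtain ⟨e, he, hue⟩ := hU; exact ⟨e, he, by simp [hue]⟩
        by_cases hL : ∃ e ∈ d :: rest, PySem.Chars.isupper e = false
        case pos =>
          have hL' : List.countP PySem.Chars.isupper (d :: rest) ≠ (d :: rest).length := by
            intro hcontra
            obtain ⟨e, he, hue⟩ := hL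
            have := (List.countP_eq_length).mp hcontra e he
            simp [hue] at this
          cases hc : PySem.Chars.isupper c
          all_goals
            obtain ⟨hg, h0, h1⟩ := pv_tail_fold (d :: rest) (pvStepA PySem.Set.empty (0, c))
              (by cases hc' : PySem.Chars.isupper c <;>
                simp [pvStepA, pvGood, hc', PySem.Set.add, PySem.Set.contains, PySem.Set.empty])
            rcases hg with hr | hr | hr | hr | hr <;>
              rw [hr] at h0 h1 ⊢ <;>
              simp_all [pvStepA, PySem.Set.len, PySem.Set.empty, PySem.Set.add, PySem.Set.contains] <;>
              (try omega)
        case neg =>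
          have hL' : List.countP PySem.Chars.isupper (d :: rest) = (d :: rest).length := by
            rw [List.countP_eq_length]
            intro e he
            by_contra hcon
            exact hL ⟨e, he, by simpa using hcon⟩
          cases hc : PySem.Chars.isupper c
          all_goals
            obtain ⟨hg, h0, h1⟩ := pv_tail_fold (d :: rest) (pvStepA PySem.Set.empty (0, c))
              (by cases hc' : PySem.Chars.isupper c <;>
                simp [pvStepA, pvGood, hc', PySem.Set.add, PySem.Set.contains, PySem.Set.empty])
            rcases hg with hr | hr | hr | hr | hr <;>
              rw [hr] at h0 h1 ⊢ <;>
              simp_all [pvStepA, PySem.Set.len, PySem.Set.empty, PySem.Set.add, PySem.Set.contains] <;>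
              (try omega) <;>
              (try (obtain ⟨e, he, hue⟩ := h0; exact absurd hue (by simp [hL.2 e he]))) <;>
              (try (have h9 : List.countP PySem.Chars.isupper rest = rest.length := List.countP_eq_length.mpr hL.2; omega))
      case neg =>
        have hU' : List.countP PySem.Chars.isupper (d :: rest) = 0 := by
          rw [List.countP_eq_zero]
          intro e he
          by_contra hcon
          exact hU ⟨e, he, by simpa using hcon⟩
        have hL : ∃ e ∈ d :: rest, PySem.Chars.isupper e = false := by
          refine ⟨d, by simp, ?_⟩
          by_contra hcon
          exact hU ⟨d, by simp, by simpa using hcon⟩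
        cases hc : PySem.Chars.isupper c
        all_goals
          obtain ⟨hg, h0, h1⟩ := pv_tail_fold (d :: rest) (pvStepA PySem.Set.empty (0, c))
            (by cases hc' : PySem.Chars.isupper c <;>
              simp [pvStepA, pvGood, hc', PySem.Set.add, PySem.Set.contains, PySem.Set.empty])
          rcases hg with hr | hr | hr | hr | hr <;>
            rw [hr] at h0 h1 ⊢ <;>
            simp_all [pvStepA, PySem.Set.len, PySem.Set.empty, PySem.Set.add, PySem.Set.contains] <;>
            (try (obtain ⟨e, he, hue⟩ := h1; exact absurd hue (by simp [hU.2 e he])))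

-- ===== VERDICT (by name: the statement is the Claim_ definition above) =====
theorem detectCapitalUse2_spec : Claim_equal_detectCapitalUse2 := by
  intro word _
  exact pv_main word
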